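-- pv_equiv track=rewrite | github.com/archeryue/CodingEval | src/codingeval/agents/subprocess_agent.py | _extract_patch
-- ===== SOURCE A (Python) =====
-- def _extract_patch(output: str) -> str:
--     """Extract a git diff/patch from the output."""
--     lines = output.split("\n")
--     patch_lines: list[str] = []
--     in_patch = False
--     for line in lines:
--         if line.startswith("diff --git"):
--             in_patch = True
--         if in_patch:
--             patch_lines.append(line)
--     return "\n".join(patch_lines) if patch_lines else ""
-- ===== SOURCE B (Python) =====
-- def _extract_patch(output: str) -> str:
--     """Extract a git diff/patch from the output."""
--     if output.startswith("diff --git"):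
--         return output
--     idx = output.find("\ndiff --git")
--     if idx == -1:
--         return ""
--     return output[idx + 1:]
-- ===== Notes on version B (the rewrite author's own statement) =====
-- stated objective: simpler
-- what changed: Instead of splitting into lines and folding with an in_patch flag then re-joining, B finds the first line starting with 'diff --git' directly on the raw string (startswith / find of '\ndiff --git') and returns the tail slice; no list of lines is ever built.
import Mathlib
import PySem

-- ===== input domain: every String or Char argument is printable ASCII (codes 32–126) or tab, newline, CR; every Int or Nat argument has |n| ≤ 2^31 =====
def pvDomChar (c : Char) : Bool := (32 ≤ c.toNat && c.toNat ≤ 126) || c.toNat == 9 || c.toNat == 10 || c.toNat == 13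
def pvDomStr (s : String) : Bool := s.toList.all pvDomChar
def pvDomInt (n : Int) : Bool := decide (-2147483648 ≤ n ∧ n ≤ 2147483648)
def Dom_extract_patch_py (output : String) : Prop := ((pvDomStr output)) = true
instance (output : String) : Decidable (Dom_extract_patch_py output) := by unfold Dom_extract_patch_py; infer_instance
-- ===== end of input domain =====

-- B scans the raw string with startswith/find and returns a tail slice instead of
-- splitting into lines, folding with an in_patch flag and re-joining (objective: simpler).

-- ===== PORT A =====
-- output.split("\n"): sep "\n" is nonempty, so PySem.Str.split? always returns some; .getD [] just unwraps it.
def extract_patch_py (output : String) : String :=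
  let lines : List String := (PySem.Str.split? output "\n").getD []
  let r := lines.foldl (fun (st : Bool × List String) line =>
    let in_patch := if PySem.Str.startswith line "diff --git" then true else st.1
    (in_patch, if in_patch then st.2 ++ [line] else st.2)) (false, [])
  if r.2 = [] then "" else PySem.Str.join "\n" r.2

-- ===== PORT B =====
def extract_patch_py_alt (output : String) : String :=
  if PySem.Str.startswith output "diff --git" then output
  else
    let idx := PySem.Str.find output "\ndiff --git"
    if idx = -1 then "" else PySem.Str.slice output (some (idx + 1)) none

-- ===== PRECONDITION & SPEC =====
def Spec_extract_patch_py (output : String) (out : String) : Prop := out = extract_patch_py_alt output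
instance (output : String) (out : String) : Decidable (Spec_extract_patch_py output out) := by unfold Spec_extract_patch_py; infer_instance

-- ===== CLAIM (what is proved, stated in full; the proofs are below) =====
def Claim_equal_extract_patch_py : Prop := ∀ (output : String), Dom_extract_patch_py output → Spec_extract_patch_py output (extract_patch_py output)

-- ===== LEMMAS AND PROOFS =====

-- clean structural recursion computing s.split("\n") on char lists
def splitNL : List Char → List (List Char)
  | [] => [[]]
  | c :: rest => if c = '\n' then [] :: splitNL rest else (splitNL rest).modifyHead (c :: ·)

theorem splitNL_ne_nil (cs : List Char) : splitNL cs ≠ [] := by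
  induction cs with
  | nil => simp [splitNL]
  | cons c rest ih =>
    simp only [splitNL]
    split
    · simp
    · cases h : splitNL rest with
      | nil => exact absurd h ih
      | cons p ps => simp [List.modifyHead]

theorem splitNL_go_eq (fuel : Nat) (l cur : List Char) (acc : List (List Char))
    (h : l.length < fuel) :
    PySem.Chars.splitOn.go ['\n'] fuel l cur acc
      = acc.reverse ++ (splitNL l).modifyHead (cur.reverse ++ ·) := by
  induction fuel generalizing l cur acc with
  | zero => omega
  | succ fuel ih =>
    cases l with
    | nil => simp [PySem.Chars.splitOn.go, splitNL, List.modifyHead]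
    | cons c rest =>
      by_cases hc : c = '\n'
      · subst hc
        rw [show PySem.Chars.splitOn.go ['\n'] (fuel+1) ('\n' :: rest) cur acc
              = PySem.Chars.splitOn.go ['\n'] fuel (List.drop 1 ('\n' :: rest)) [] (cur.reverse :: acc) from by
            simp [PySem.Chars.splitOn.go, List.isPrefixOf]]
        rw [ih _ _ _ (by simpa using Nat.lt_of_succ_lt_succ h)]
        simp only [splitNL, List.drop_one, List.tail_cons, List.reverse_cons,
          List.append_assoc, List.singleton_append, List.modifyHead]
        cases hs : splitNL rest <;> simp
      · rw [show PySem.Chars.splitOn.go ['\n'] (fuel+1) (c :: rest) cur acc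
              = PySem.Chars.splitOn.go ['\n'] fuel rest (c :: cur) acc from by
            simp [PySem.Chars.splitOn.go, List.isPrefixOf, Ne.symm hc]]
        rw [ih _ _ _ (by simpa using Nat.lt_of_succ_lt_succ h)]
        simp only [splitNL, if_neg hc]
        cases hs : splitNL rest with
        | nil => exact absurd hs (splitNL_ne_nil rest)
        | cons p ps => simp [List.modifyHead]

theorem splitOn_eq_splitNL (cs : List Char) : PySem.Chars.splitOn cs ['\n'] = splitNL cs := by
  unfold PySem.Chars.splitOn
  rw [splitNL_go_eq _ _ _ _ (by omega)]
  cases h : splitNL cs with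
  | nil => exact absurd h (splitNL_ne_nil cs)
  | cons p ps => simp [List.modifyHead]

theorem splitNL_no_nl (cs : List Char) (h : '\n' ∉ cs) : splitNL cs = [cs] := by
  induction cs with
  | nil => rfl
  | cons c rest ih =>
    simp only [List.mem_cons, not_or] at h
    simp [splitNL, Ne.symm h.1, ih h.2, List.modifyHead]

theorem splitNL_append (l0 rest : List Char) (h : '\n' ∉ l0) :
    splitNL (l0 ++ '\n' :: rest) = l0 :: splitNL rest := by
  induction l0 with
  | nil => simp [splitNL]
  | cons c l0' ih =>
    simp only [List.mem_cons, not_or] at h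
    simp [splitNL, Ne.symm h.1, ih h.2, List.modifyHead]

theorem join_splitNL (cs : List Char) : PySem.Chars.join ['\n'] (splitNL cs) = cs := by
  induction cs with
  | nil => rfl
  | cons c rest ih =>
    simp only [splitNL]
    by_cases hc : c = '\n'
    · subst hc
      rw [if_pos rfl]
      cases hs : splitNL rest with
      | nil => exact absurd hs (splitNL_ne_nil rest)
      | cons p ps =>
        rw [hs] at ih
        simpa [PySem.Chars.join, List.intercalate] using ih
    · simp only [if_neg hc]
      cases hs : splitNL rest with
      | nil => exact absurd hs (splitNL_ne_nil rest)
      | cons p ps =>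
        rw [hs] at ih
        cases ps with
        | nil => simpa [PySem.Chars.join, List.intercalate, List.modifyHead] using congrArg (c :: ·) ih
        | cons q qs =>
          simp only [List.modifyHead]
          simpa [PySem.Chars.join, List.intercalate] using congrArg (c :: ·) ih

def markC : List Char := "diff --git".toList

-- A's loop body as a named function (definitionally the lambda in the port)
def stepA (st : Bool × List String) (line : String) : Bool × List String :=
  let in_patch := if PySem.Str.startswith line "diff --git" then true else st.1
  (in_patch, if in_patch then st.2 ++ [line] else st.2)

-- the lines kept by A's fold: everything from the first line starting with the marker
def fL : List (List Char) → List (List Char)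
  | [] => []
  | l :: ls => if markC.isPrefixOf l then l :: ls else fL ls

def fLs : List String → List String
  | [] => []
  | l :: ls => if PySem.Str.startswith l "diff --git" then l :: ls else fLs ls

theorem foldl_true (ls : List String) (acc : List String) :
    ls.foldl stepA (true, acc) = (true, acc ++ ls) := by
  induction ls generalizing acc with
  | nil => simp
  | cons l ls ih =>
    have hstep : stepA (true, acc) l = (true, acc ++ [l]) := by simp [stepA]
    rw [List.foldl_cons, hstep, ih]
    simp

theorem foldl_false (ls : List String) :
    (ls.foldl stepA (false, [])).2 = fLs ls := by
  induction ls with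
  | nil => rfl
  | cons l ls ih =>
    rw [List.foldl_cons]
    by_cases hl : PySem.Str.startswith l "diff --git"
    · have hstep : stepA (false, []) l = (true, [l]) := by
        simp only [stepA, hl]; rfl
      rw [hstep, foldl_true,
        show fLs (l :: ls) = if PySem.Str.startswith l "diff --git" then l :: ls else fLs ls from rfl,
        if_pos hl]
      simp
    · have hlf : PySem.Str.startswith l "diff --git" = false := by
        revert hl; cases PySem.Str.startswith l "diff --git" <;> simp
      have hstep : stepA (false, []) l = (false, []) := by
        simp only [stepA, hlf]; rfl
      rw [hstep, ih,
        show fLs (l :: ls) = if PySem.Str.startswith l "diff --git" then l :: ls else fLs ls from rfl,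
        if_neg hl]

theorem startswith_ofList (l : List Char) :
    PySem.Str.startswith (String.ofList l) "diff --git" = markC.isPrefixOf l := by
  simp [PySem.Str.startswith, PySem.Chars.startswith, markC]

theorem fLs_map (L : List (List Char)) : fLs (L.map String.ofList) = (fL L).map String.ofList := by
  induction L with
  | nil => rfl
  | cons l ls ih =>
    simp only [List.map_cons, fLs, fL, startswith_ofList]
    by_cases hl : markC.isPrefixOf l
    · rw [if_pos hl, if_pos hl]; rfl
    · rw [if_neg hl, if_neg hl, ih]

theorem A_chars (output : String) :
    extract_patch_py output = String.ofList (PySem.Chars.join ['\n'] (fL (splitNL output.toList))) := by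
  have hA : extract_patch_py output
      = (if (((PySem.Str.split? output "\n").getD []).foldl stepA (false, [])).2 = [] then ""
         else PySem.Str.join "\n" (((PySem.Str.split? output "\n").getD []).foldl stepA (false, [])).2) := rfl
  rw [hA]
  have hsplit : (PySem.Str.split? output "\n").getD []
      = (splitNL output.toList).map String.ofList := by
    rw [PySem.Str.split?]
    rw [show ("\n" : String).toList = ['\n'] from by decide]
    simp [PySem.Chars.split?, splitOn_eq_splitNL]
  rw [hsplit, foldl_false, fLs_map]
  by_cases h : (fL (splitNL output.toList)).map String.ofList = []
  · rw [if_pos h]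
    simp only [List.map_eq_nil_iff] at h
    rw [h]; rfl
  · rw [if_neg h]
    rw [PySem.Str.join]
    rw [show ("\n" : String).toList = ['\n'] from by decide]
    simp [Function.comp_def]

-- B on char lists
def Bchars (cs : List Char) : List Char :=
  if markC.isPrefixOf cs then cs
  else if PySem.Chars.find cs ('\n' :: markC) = -1 then []
  else PySem.List.slice cs (some (PySem.Chars.find cs ('\n' :: markC) + 1)) none

theorem B_chars (output : String) :
    extract_patch_py_alt output = String.ofList (Bchars output.toList) := by
  unfold extract_patch_py_alt Bchars
  have hsw : PySem.Str.startswith output "diff --git" = markC.isPrefixOf output.toList := by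
    simp [PySem.Str.startswith, PySem.Chars.startswith, markC]
  have hfind : PySem.Str.find output "\ndiff --git" = PySem.Chars.find output.toList ('\n' :: markC) := by
    rw [PySem.Str.find]
    rw [show ("\ndiff --git" : String).toList = '\n' :: markC from by decide]
  by_cases h : markC.isPrefixOf output.toList
  · rw [hsw, if_pos h, if_pos h]
    exact String.ofList_toList.symm
  · rw [hsw, if_neg h, if_neg h]
    simp only [hfind]
    by_cases hf : PySem.Chars.find output.toList ('\n' :: markC) = -1
    · rw [if_pos hf, if_pos hf]
    · rw [if_neg hf, if_neg hf]
      rw [PySem.Str.slice, PySem.Chars.slice]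

theorem find_eq_coe (cs pat : List Char) (k : Nat)
    (h1 : pat <+: cs.drop k) (h2 : ∀ i, i < k → ¬ pat <+: cs.drop i) :
    PySem.Chars.find cs pat = (k : Int) := by
  have hinf : pat <:+: cs := (h1.isInfix).trans (List.drop_suffix k cs).isInfix
  have hne : PySem.Chars.find cs pat ≠ -1 := (PySem.Chars.find_ne_neg_one_iff cs pat).mpr hinf
  have hspec := PySem.Chars.findFrom_natCast_spec cs pat 0 (Nat.zero_le _)
    (by simpa [PySem.Chars.findFrom_zero] using hne)
  simp only [Nat.cast_zero, PySem.Chars.findFrom_zero] at hspec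
  obtain ⟨hge, hpr, hmin⟩ := hspec
  have hjk : (PySem.Chars.find cs pat).toNat = k := by
    rcases Nat.lt_trichotomy (PySem.Chars.find cs pat).toNat k with h | h | h
    · exact absurd hpr (h2 _ h)
    · exact h
    · exact absurd h1 (hmin k (Nat.zero_le _) h)
  omega

theorem nl_not_mem_markC : '\n' ∉ markC := by decide

theorem not_mark_prefix_append (l0 rest : List Char) (h0 : '\n' ∉ l0)
    (hm : ¬ markC <+: l0) : ¬ markC <+: (l0 ++ '\n' :: rest) := by
  intro hp
  by_cases hlen : markC.length ≤ l0.length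
  · apply hm
    have := List.prefix_iff_eq_take.mp hp
    rw [List.take_append_of_le_length hlen] at this
    exact this ▸ List.take_prefix _ _
  · have hlt : l0.length < markC.length := by omega
    have hget := hp.getElem hlt
    have hnl : (l0 ++ '\n' :: rest)[l0.length]'(by simp) = '\n' := by simp
    have : '\n' ∈ markC := by
      rw [← hget.trans hnl]
      exact List.getElem_mem _
    exact nl_not_mem_markC this

-- no occurrence of '\n'::markC can start inside the newline-free first line
theorem no_match_in_l0 (l0 rest : List Char) (h0 : '\n' ∉ l0) (i : Nat) (hi : i < l0.length)
    (hp : ('\n' :: markC) <+: (l0 ++ '\n' :: rest).drop i) : False := by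
  rcases hp with ⟨t, ht⟩
  have h2 : (l0 ++ '\n' :: rest)[i]? = some '\n' := by
    rw [← List.head?_drop, ← ht]
    rfl
  rw [List.getElem?_append_left hi] at h2
  exact h0 (List.mem_of_getElem? h2)

theorem Bchars_step (l0 rest : List Char) (h0 : '\n' ∉ l0) (hm : ¬ markC <+: l0) :
    Bchars (l0 ++ '\n' :: rest) = Bchars rest := by
  have hncs : ¬ markC.isPrefixOf (l0 ++ '\n' :: rest) := by
    rw [List.isPrefixOf_iff_prefix]
    exact not_mark_prefix_append l0 rest h0 hm
  have hdropeq : ∀ i : Nat, (l0 ++ '\n' :: rest).drop (l0.length + 1 + i) = rest.drop i := by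
    intro i
    rw [show l0.length + 1 + i = l0.length + (i + 1) from by omega, List.drop_append,
      List.drop_eq_nil_of_le (by omega),
      show l0.length + (i + 1) - l0.length = i + 1 from by omega,
      List.drop_succ_cons, List.nil_append]
  by_cases hr : markC.isPrefixOf rest
  · -- match right at the boundary newline: find = l0.length
    have hr' : markC <+: rest := List.isPrefixOf_iff_prefix.mp hr
    have hfind : PySem.Chars.find (l0 ++ '\n' :: rest) ('\n' :: markC) = (l0.length : Int) := by
      apply find_eq_coe
      · rw [List.drop_left]
        exact List.cons_prefix_cons.mpr ⟨rfl, hr'⟩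
      · exact fun i hi hp => no_match_in_l0 l0 rest h0 i hi hp
    rw [Bchars, if_neg hncs, hfind, if_neg (by omega)]
    rw [show (l0.length : Int) + 1 = ((l0.length + 1 : Nat) : Int) from by push_cast; ring]
    rw [PySem.List.slice_from_natCast]
    rw [show l0.length + 1 = l0.length + 1 + 0 from rfl, hdropeq, List.drop_zero]
    rw [Bchars, if_pos hr]
  · have hr' : ¬ markC <+: rest := fun hc => hr (List.isPrefixOf_iff_prefix.mpr hc)
    by_cases hfr : PySem.Chars.find rest ('\n' :: markC) = -1
    · -- no match anywhere
      have hnir : ¬ ('\n' :: markC) <:+: rest :=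
        (PySem.Chars.find_eq_neg_one_iff rest _).mp hfr
      have hfc : PySem.Chars.find (l0 ++ '\n' :: rest) ('\n' :: markC) = -1 := by
        rw [PySem.Chars.find_eq_neg_one_iff]
        intro hinf
        obtain ⟨j, hj⟩ := (PySem.Chars.exists_prefix_drop_iff_isIn _ _).mpr
          ((PySem.Chars.isIn_iff_infix _ _).mpr hinf)
        rcases Nat.lt_trichotomy j l0.length with h | h | h
        · exact no_match_in_l0 l0 rest h0 j h hj
        · subst h
          rw [List.drop_left] at hj
          exact hr' ((List.cons_prefix_cons.mp hj).2)
        · have hjeq : j = l0.length + 1 + (j - l0.length - 1) := by omega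
          rw [hjeq, hdropeq] at hj
          exact hnir (hj.isInfix.trans (List.drop_suffix _ rest).isInfix)
      rw [Bchars, if_neg hncs, hfc, if_pos rfl, Bchars, if_neg hr, hfr, if_pos rfl]
    · -- match strictly inside rest
      have hspec := PySem.Chars.findFrom_natCast_spec rest ('\n' :: markC) 0 (Nat.zero_le _)
        (by simpa [PySem.Chars.findFrom_zero] using hfr)
      simp only [Nat.cast_zero, PySem.Chars.findFrom_zero] at hspec
      obtain ⟨hge, hpr, hmin⟩ := hspec
      set jr := (PySem.Chars.find rest ('\n' :: markC)).toNat with hjr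
      have hfreq : PySem.Chars.find rest ('\n' :: markC) = (jr : Int) := by omega
      have hfc : PySem.Chars.find (l0 ++ '\n' :: rest) ('\n' :: markC)
          = ((l0.length + 1 + jr : Nat) : Int) := by
        apply find_eq_coe
        · rw [hdropeq]; exact hpr
        · intro i hi hp
          rcases Nat.lt_trichotomy i l0.length with h | h | h
          · exact no_match_in_l0 l0 rest h0 i h hp
          · subst h
            rw [List.drop_left] at hp
            exact hr' ((List.cons_prefix_cons.mp hp).2)
          · have hieq : i = l0.length + 1 + (i - l0.length - 1) := by omega
            rw [hieq, hdropeq] at hp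
            exact hmin _ (Nat.zero_le _) (by omega) hp
      rw [Bchars, if_neg hncs, hfc, if_neg (by omega), Bchars, if_neg hr, hfreq,
        if_neg (by omega)]
      rw [show ((l0.length + 1 + jr : Nat) : Int) + 1 = ((l0.length + 1 + (jr + 1) : Nat) : Int) from by push_cast; ring]
      rw [show ((jr : Nat) : Int) + 1 = ((jr + 1 : Nat) : Int) from by push_cast; ring]
      rw [PySem.List.slice_from_natCast, PySem.List.slice_from_natCast, hdropeq]

theorem exists_split_nl (cs : List Char) (h : '\n' ∈ cs) :
    ∃ l0 rest, cs = l0 ++ '\n' :: rest ∧ '\n' ∉ l0 := by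
  induction cs with
  | nil => cases h
  | cons c tl ih =>
    by_cases hc : c = '\n'
    · exact ⟨[], tl, by rw [hc]; rfl, by simp⟩
    · have htl : '\n' ∈ tl := by
        rcases List.mem_cons.mp h with h1 | h1
        · exact absurd h1.symm hc
        · exact h1
      obtain ⟨l0, rest, hcs, h0⟩ := ih htl
      exact ⟨c :: l0, rest, by rw [hcs]; rfl, by simp [h0, Ne.symm hc]⟩

theorem main_chars (cs : List Char) :
    PySem.Chars.join ['\n'] (fL (splitNL cs)) = Bchars cs := by
  induction hn : cs.length using Nat.strong_induction_on generalizing cs with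
  | _ n ih =>
  subst hn
  by_cases hmem : '\n' ∈ cs
  · -- cs = l0 ++ '\n' :: rest with '\n' ∉ l0
    obtain ⟨l0, rest, hcs, h0⟩ := exists_split_nl cs hmem
    subst hcs
    rw [splitNL_append l0 rest h0]
    by_cases hm : markC.isPrefixOf l0
    · -- first line matches: A keeps all the lines, B's startswith fires
      have hm' : markC <+: l0 := List.isPrefixOf_iff_prefix.mp hm
      have hmcs : markC.isPrefixOf (l0 ++ '\n' :: rest) := by
        rw [List.isPrefixOf_iff_prefix]
        exact hm'.trans (List.prefix_append _ _)
      rw [Bchars, if_pos hmcs]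
      rw [show fL (l0 :: splitNL rest) = l0 :: splitNL rest from by simp [fL, hm]]
      rw [← splitNL_append l0 rest h0, join_splitNL]
    · have hm' : ¬ markC <+: l0 := fun hc => hm (List.isPrefixOf_iff_prefix.mpr hc)
      rw [show fL (l0 :: splitNL rest) = fL (splitNL rest) from by simp [fL, hm]]
      have hlen : rest.length < (l0 ++ '\n' :: rest).length := by
        rw [List.length_append, List.length_cons]; omega
      rw [ih rest.length hlen rest rfl]
      exact (Bchars_step l0 rest h0 hm').symm
  · -- no newline: a single line
    rw [splitNL_no_nl cs hmem, Bchars]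
    by_cases hm : markC.isPrefixOf cs
    · rw [if_pos hm]
      simp [fL, hm, PySem.Chars.join, List.intercalate]
    · rw [if_neg hm]
      have hfc : PySem.Chars.find cs ('\n' :: markC) = -1 := by
        rw [PySem.Chars.find_eq_neg_one_iff]
        intro hinf
        exact hmem (hinf.subset (by simp))
      rw [hfc, if_pos rfl]
      have : ¬ markC <+: cs := fun hc => hm (List.isPrefixOf_iff_prefix.mpr hc)
      simp [fL, hm, PySem.Chars.join, List.intercalate]

-- ===== VERDICT (by name: the statement is the Claim_ definition above) =====
theorem extract_patch_py_spec : Claim_equal_extract_patch_py := by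
  intro output _
  unfold Spec_extract_patch_py
  rw [A_chars, B_chars, main_chars]
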